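-- pv_equiv track=rewrite | github.com/FaisalTabrez/DeepBio_Edge_v3 | tests/validation_report_generator.py | _compute_rarefaction
-- ===== SOURCE A (Python) =====
-- from typing import Any, Dict, List, Optional, Sequence
--
-- def _compute_rarefaction(labels: List[str]) -> Dict[str, List[int] | List[float]]:
--     if not labels:
--         return {"sample_sizes": [], "diversity": []}
--
--     unique_counts = []
--     sample_sizes = []
--     max_n = len(labels)
--     step = max(5, max_n // 10)
--
--     for size in range(step, max_n + 1, step):
--         sample = labels[:size]
--         unique_counts.append(len(set(sample)))
--         sample_sizes.append(size)
--
--     return {"sample_sizes": sample_sizes, "diversity": unique_counts}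
-- ===== SOURCE B (Python) =====
-- def _compute_rarefaction(labels):
--     if not labels:
--         return {"sample_sizes": [], "diversity": []}
--     step = max(5, len(labels) // 10)
--     # cumulative distinct counts: cum[i-1] = number of distinct labels among the first i
--     cum = []
--     seen = set()
--     for lab in labels:
--         seen.add(lab)
--         cum.append(len(seen))
--     # keep the entries at 1-based positions that are multiples of step
--     pairs = [(i, c) for i, c in enumerate(cum, 1) if i % step == 0]
--     return {"sample_sizes": [i for i, _ in pairs],
--             "diversity": [c for _, c in pairs]}
-- ===== Notes on version B (the rewrite author's own statement) =====
-- stated objective: alternative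
-- what changed: Instead of A's per-boundary prefix rescans (for each size in range(step, n+1, step), slice the prefix and rebuild its set from scratch), B first builds the cumulative distinct-count sequence in one running-set pass and then selects the entries whose 1-based position is a multiple of step, projecting positions and counts.
import Mathlib
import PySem

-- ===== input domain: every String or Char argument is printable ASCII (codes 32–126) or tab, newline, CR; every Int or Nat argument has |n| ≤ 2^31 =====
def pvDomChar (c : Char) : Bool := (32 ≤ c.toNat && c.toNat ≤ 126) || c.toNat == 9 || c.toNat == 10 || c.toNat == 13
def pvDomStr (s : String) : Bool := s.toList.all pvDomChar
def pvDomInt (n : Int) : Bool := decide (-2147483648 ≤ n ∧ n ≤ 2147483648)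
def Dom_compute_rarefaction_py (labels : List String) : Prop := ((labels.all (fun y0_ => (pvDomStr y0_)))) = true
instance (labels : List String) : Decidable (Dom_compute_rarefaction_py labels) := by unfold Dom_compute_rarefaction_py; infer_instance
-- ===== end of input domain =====

-- B replaces A's per-boundary prefix rescans (rebuild set(labels[:size]) for every boundary) by a
-- staged computation: one pass builds the cumulative distinct-count sequence, then the entries at
-- positions that are multiples of step are selected and projected; objective = alternative.

-- ===== PORT A =====
def compute_rarefaction_py (labels : List String) : List (String × List Int) :=
  if labels = [] then [("sample_sizes", ([] : List Int)), ("diversity", ([] : List Int))]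
  else
    let max_n : Int := (labels.length : Int)
    let step : Int := max 5 (PySem.Int.floordiv max_n 10)
    let r := (PySem.List.pyRange step (max_n + 1) step).foldl
      (fun (acc : List Int × List Int) size =>
        let sample := PySem.List.slice labels none (some size)
        (acc.1 ++ [PySem.Set.len (PySem.Set.ofList sample)], acc.2 ++ [size]))
      ([], [])
    [("sample_sizes", r.2), ("diversity", r.1)]

-- ===== PORT B =====
-- the running-set pass producing the cumulative distinct-count sequence (B's first loop)
def pvCumDistinct : List String → PySem.Set String → List Int
  | [], _ => []
  | x :: rs, seen =>
      let s := PySem.Set.add seen x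
      PySem.Set.len s :: pvCumDistinct rs s

def compute_rarefaction_py_alt (labels : List String) : List (String × List Int) :=
  if labels = [] then [("sample_sizes", ([] : List Int)), ("diversity", ([] : List Int))]
  else
    let step : Int := max 5 (PySem.Int.floordiv (labels.length : Int) 10)
    let cum : List Int := pvCumDistinct labels PySem.Set.empty
    let pairs : List (Int × Int) :=
      (PySem.List.enumerate cum 1).filter (fun p => decide (PySem.Int.mod p.1 step = 0))
    [("sample_sizes", pairs.map (fun p => p.1)), ("diversity", pairs.map (fun p => p.2))]

-- ===== PRECONDITION & SPEC =====
def Spec_compute_rarefaction_py (labels : List String) (out : List (String × List Int)) : Prop := out = compute_rarefaction_py_alt labels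
instance (labels : List String) (out : List (String × List Int)) : Decidable (Spec_compute_rarefaction_py labels out) := by unfold Spec_compute_rarefaction_py; infer_instance

-- ===== CLAIM (what is proved, stated in full; the proofs are below) =====
def Claim_equal_compute_rarefaction_py : Prop := ∀ (labels : List String), Dom_compute_rarefaction_py labels → Spec_compute_rarefaction_py labels (compute_rarefaction_py labels)

-- ===== LEMMAS AND PROOFS =====

-- the multiples of `step` in the interval [a, b)
def pvMults (step a b : Int) : List Int :=
  (PySem.List.pyRange a b 1).filter (fun i => decide (PySem.Int.mod i step = 0))

lemma pvFoldA (f : Int → Int) (l : List Int) (u s : List Int) :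
    l.foldl (fun (acc : List Int × List Int) size => (acc.1 ++ [f size], acc.2 ++ [size])) (u, s)
      = (u ++ l.map f, s ++ l) := by
  induction l generalizing u s with
  | nil => simp
  | cons a t ih => simp [ih]

lemma pvOfListSnoc {α : Type} [BEq α] (pre : List α) (x : α) :
    PySem.Set.ofList (pre ++ [x]) = PySem.Set.add (PySem.Set.ofList pre) x := by
  simp [PySem.Set.ofList_eq_foldl, List.foldl_append]

lemma pvTakeSnoc {α : Type} (pre : List α) (x : α) (rs : List α) :
    (pre ++ x :: rs).take (pre.length + 1) = pre ++ [x] := by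
  induction pre with
  | nil => simp
  | cons a t ih => simp [ih]

lemma pvMultsCons (step a b : Int) (hab : a < b) :
    pvMults step a b = (if PySem.Int.mod a step = 0 then [a] else []) ++ pvMults step (a + 1) b := by
  unfold pvMults
  rw [PySem.List.pyRange_one_cons hab]
  by_cases h : PySem.Int.mod a step = 0 <;> simp [h]

-- B's filtered enumeration of the cumulative counts is the list of multiples of step paired with
-- the distinct count of the corresponding prefix
lemma pvPairsChar (step : Int) (rest : List String) :
    ∀ (pre : List String),
    (PySem.List.enumerate (pvCumDistinct rest (PySem.Set.ofList pre)) ((pre.length : Int) + 1)).filter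
        (fun p => decide (PySem.Int.mod p.1 step = 0))
      = (pvMults step ((pre.length : Int) + 1) ((pre.length : Int) + (rest.length : Int) + 1)).map
          (fun m => (m, PySem.Set.len (PySem.Set.ofList ((pre ++ rest).take m.toNat)))) := by
  induction rest with
  | nil =>
      intro pre
      simp [pvCumDistinct, pvMults]
  | cons x rs ih =>
      intro pre
      have hlt : (pre.length : Int) + 1 < (pre.length : Int) + ((x :: rs).length : Int) + 1 := by
        simp
      have harg : (pre.length : Int) + 1 + 1 = (((pre ++ [x]).length : Int) + 1) := by simp
      have hassoc : pre ++ [x] ++ rs = pre ++ x :: rs := by simp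
      have htoNat : ((pre.length : Int) + 1).toNat = pre.length + 1 := by omega
      rw [pvCumDistinct, PySem.List.enumerate_cons, pvMultsCons step ((pre.length : Int) + 1) _ hlt]
      by_cases h : PySem.Int.mod ((pre.length : Int) + 1) step = 0
      · simp only [List.filter_cons, h, decide_true, if_true, ← pvOfListSnoc]
        rw [harg, ih (pre ++ [x])]
        simp only [hassoc, htoNat, pvTakeSnoc, List.length_append, List.length_cons,
          List.length_nil, List.map_cons, List.cons_append, List.nil_append]
        push_cast
        ring_nf
      · simp only [List.filter_cons, h, decide_false, if_false, ← pvOfListSnoc]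
        rw [harg, ih (pre ++ [x])]
        simp only [hassoc, List.length_append, List.length_cons, List.length_nil,
          List.nil_append]
        push_cast
        ring_nf

lemma pvRangeStepEqMults (N step : Int) (h : 0 < step) :
    PySem.List.pyRange step (N + 1) step = pvMults step 1 (N + 1) := by
  have pw1 : (PySem.List.pyRange step (N + 1) step).Pairwise (· < ·) := by
    rw [PySem.List.pyRange_of_pos _ _ h]
    exact List.pairwise_lt_range.map _ (fun a b hab => by
      have := mul_lt_mul_of_pos_left (Int.ofNat_lt.mpr hab) h
      omega)
  have pw2 : (pvMults step 1 (N + 1)).Pairwise (· < ·) :=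
    (PySem.List.pairwise_lt_pyRange_one 1 (N + 1)).filter _
  have mem : ∀ x, x ∈ PySem.List.pyRange step (N + 1) step ↔ x ∈ pvMults step 1 (N + 1) := by
    intro x
    rw [PySem.List.mem_pyRange_iff_of_pos h, pvMults, List.mem_filter,
        PySem.List.mem_pyRange_one, decide_eq_true_eq, PySem.Int.mod_eq_zero_iff_dvd]
    constructor
    · rintro ⟨h1, h2, h3⟩
      have hx : step ∣ x := by
        have := dvd_add h3 (dvd_refl step)
        simpa using this
      exact ⟨⟨by omega, h2⟩, hx⟩
    · rintro ⟨⟨h1, h2⟩, h3⟩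
      exact ⟨Int.le_of_dvd (by omega) h3, h2, dvd_sub h3 dvd_rfl⟩
  exact ((List.perm_ext_iff_of_nodup (pw1.imp ne_of_lt) (pw2.imp ne_of_lt)).mpr mem).eq_of_pairwise
    (fun a b _ _ hab hba => le_antisymm hab hba) (pw1.imp le_of_lt) (pw2.imp le_of_lt)

-- ===== VERDICT (by name: the statement is the Claim_ definition above) =====
theorem compute_rarefaction_py_spec : Claim_equal_compute_rarefaction_py := by
  intro labels _
  unfold Spec_compute_rarefaction_py compute_rarefaction_py compute_rarefaction_py_alt
  by_cases hl : labels = []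
  · simp [hl]
  · simp only [if_neg hl]
    have hstep : 0 < max 5 (PySem.Int.floordiv (labels.length : Int) 10) :=
      lt_of_lt_of_le (by norm_num) (le_max_left _ _)
    have hB := pvPairsChar (max 5 (PySem.Int.floordiv (labels.length : Int) 10)) labels []
    simp only [List.length_nil, Nat.cast_zero, zero_add, List.nil_append,
      show PySem.Set.ofList ([] : List String) = PySem.Set.empty from rfl] at hB
    rw [pvFoldA, hB, pvRangeStepEqMults _ _ hstep]
    simp only [List.nil_append, List.map_map, Function.comp_def]
    have hdiv : (pvMults (max 5 (PySem.Int.floordiv (labels.length : Int) 10)) 1 ((labels.length : Int) + 1)).map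
          (fun size => PySem.Set.len (PySem.Set.ofList (PySem.List.slice labels none (some size))))
        = (pvMults (max 5 (PySem.Int.floordiv (labels.length : Int) 10)) 1 ((labels.length : Int) + 1)).map
          (fun m => PySem.Set.len (PySem.Set.ofList (labels.take m.toNat))) := by
      apply List.map_congr_left
      intro a ha
      have hm1 : (1 : Int) ≤ a := (PySem.List.mem_pyRange_one.mp (List.mem_filter.mp ha).1).1
      rw [PySem.List.slice_to labels (by omega)]
    simp only [hdiv, List.map_id']
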